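-- pv_equiv track=rewrite | github.com/ZGmty/XHS_WECHAT | src/social_ingestion_mcp/adapters/bitable_adapter.py | _normalize_table_id
-- ===== SOURCE A (Python) =====
-- def _normalize_table_id(value: object) -> str:
--     text = str(value or "").strip()
--     if not text:
--         return text
--     for separator in ("?", "&"):
--         if separator in text:
--             text = text.split(separator, 1)[0]
--     return text
-- ===== SOURCE B (Python) =====
-- def _normalize_table_id(value: object) -> str:
--     text = str(value or "").strip()
--     out = []
--     for ch in text:
--         if ch in "?&":
--             break
--         out.append(ch)
--     return "".join(out)
-- ===== Notes on version B (the rewrite author's own statement) =====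
-- stated objective: simpler
-- what changed: B replaces A's staged string surgery (membership test then split(sep,1)[0] for each separator in turn) with a single character-level scan that copies characters into an accumulator and breaks at the first '?' or '&', so no split or second truncation pass ever happens.
import Mathlib
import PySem

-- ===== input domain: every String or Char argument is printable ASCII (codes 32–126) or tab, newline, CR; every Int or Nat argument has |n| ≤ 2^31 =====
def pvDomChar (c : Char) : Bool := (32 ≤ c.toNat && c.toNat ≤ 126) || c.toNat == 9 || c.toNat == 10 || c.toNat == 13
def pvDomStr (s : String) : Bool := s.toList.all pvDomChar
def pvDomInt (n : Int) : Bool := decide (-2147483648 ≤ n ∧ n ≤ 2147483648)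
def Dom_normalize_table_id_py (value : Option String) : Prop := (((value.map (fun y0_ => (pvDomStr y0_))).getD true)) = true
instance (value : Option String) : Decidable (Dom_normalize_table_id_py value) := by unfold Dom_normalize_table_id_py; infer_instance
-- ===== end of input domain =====

-- B replaces A's staged split(sep,1)[0] truncations with a single character scan that copies into an accumulator and breaks at the first '?' or '&'; same O(n) cost, simpler one-pass decomposition.


-- ===== PORT A =====
-- str(value or "") : None and "" are both falsy and give ""; value.getD "" agrees in both cases (strip("") = "")
def normalize_table_id_py (value : Option String) : String :=
  let text := PySem.Str.strip (value.getD "")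
  if text = "" then text
  else
    ["?", "&"].foldl (fun t sep =>
      if PySem.Str.isIn sep t = true then
        -- text.split(separator, 1)[0]
        (PySem.List.pyGet? ((PySem.Str.splitMax? t sep 1).getD []) 0).getD ""
      else t) text

-- ===== PORT B =====
-- the for-loop with break: copy characters until the first '?' or '&' ('ch in "?&"' on a single char)
def altScan : List Char → List Char
  | [] => []
  | c :: rest => if c = '?' || c = '&' then [] else c :: altScan rest

def normalize_table_id_py_alt (value : Option String) : String :=
  let text := PySem.Str.strip (value.getD "")
  String.ofList (altScan text.toList)

-- ===== PRECONDITION & SPEC =====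
def Spec_normalize_table_id_py (value : Option String) (out : String) : Prop := out = normalize_table_id_py_alt value
instance (value : Option String) (out : String) : Decidable (Spec_normalize_table_id_py value out) := by unfold Spec_normalize_table_id_py; infer_instance

-- ===== CLAIM (what is proved, stated in full; the proofs are below) =====
def Claim_equal_normalize_table_id_py : Prop := ∀ (value : Option String), Dom_normalize_table_id_py value → Spec_normalize_table_id_py value (normalize_table_id_py value)

-- ===== LEMMAS AND PROOFS =====

-- splitOnMax.go pushes finished pieces onto acc and reverses at the end
theorem go_append (sep : List Char) : ∀ (fuel : Nat) (m : Nat) (t cur : List Char) (acc : List (List Char)),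
    PySem.Chars.splitOnMax.go sep fuel m t cur acc = acc.reverse ++ PySem.Chars.splitOnMax.go sep fuel m t cur [] := by
  intro fuel
  induction fuel with
  | zero => intro m t cur acc; simp [PySem.Chars.splitOnMax.go]
  | succ f ih =>
    intro m t cur acc
    cases t with
    | nil => simp [PySem.Chars.splitOnMax.go]
    | cons c rest =>
      rw [PySem.Chars.splitOnMax.go, PySem.Chars.splitOnMax.go]
      by_cases hm : m = 0
      · simp [hm]
      · simp only [hm, if_false]
        by_cases hp : sep.isPrefixOf (c :: rest) = true
        · simp only [hp, if_true]
          rw [ih _ _ _ (cur.reverse :: acc), ih _ _ _ [cur.reverse]]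
          simp
        · simp only [hp]
          exact ih _ _ _ acc

-- the first piece produced by go (maxsplit 1, single-char separator) is the prefix before the separator
theorem go_head (c : Char) : ∀ (fuel : Nat) (t cur : List Char), t.length < fuel →
    (PySem.Chars.splitOnMax.go [c] fuel 1 t cur []).head? = some (cur.reverse ++ t.takeWhile (· ≠ c)) := by
  intro fuel
  induction fuel with
  | zero => intro t cur h; omega
  | succ f ih =>
    intro t cur h
    cases t with
    | nil => simp [PySem.Chars.splitOnMax.go]
    | cons a rest =>
      rw [PySem.Chars.splitOnMax.go]
      by_cases hp : List.isPrefixOf [c] (a :: rest) = true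
      · have hac : a = c := by have := hp; simp [List.isPrefixOf] at this; exact this.symm
        subst hac
        simp only [if_neg one_ne_zero, hp, if_true]
        rw [go_append]
        simp
      · have hac : ¬ (a = c) := by intro hh; exact hp (by simp [List.isPrefixOf, hh])
        simp only [if_neg one_ne_zero, hp]
        have := ih rest (a :: cur) (by simpa using Nat.lt_of_succ_lt_succ h)
        simp only [ne_eq, decide_not] at this ⊢
        simp [this, hac]

theorem split_head (c : Char) (t : List Char) :
    (PySem.Chars.splitOnMax t [c] 1).head? = some (t.takeWhile (· ≠ c)) := by
  rw [PySem.Chars.splitOnMax]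
  have h1 : ¬ ((1:Int) < 0) := by norm_num
  simp only [h1, if_false]
  have := go_head c (t.length + 1) t [] (by omega)
  simpa using this

theorem singleton_infix (c : Char) (l : List Char) : [c] <:+: l ↔ c ∈ l := by
  constructor
  · intro h; exact h.sublist.mem (by simp)
  · intro h
    obtain ⟨s, t, rfl⟩ := List.append_of_mem h
    exact ⟨s, t, by simp⟩

theorem tw_of_not_mem (c : Char) (L : List Char) (h : c ∉ L) :
    L.takeWhile (· ≠ c) = L := by
  rw [List.takeWhile_eq_self_iff]
  intro x hx; simp; rintro rfl; exact h hx

-- one step of A's loop cuts at the separator (single-char sep), i.e. takeWhile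
theorem stepA_toList (t : String) (c : Char) (sep : String) (hsep : sep.toList = [c]) :
    (if PySem.Str.isIn sep t = true then (PySem.List.pyGet? ((PySem.Str.splitMax? t sep 1).getD []) 0).getD "" else t).toList
      = t.toList.takeWhile (· ≠ c) := by
  by_cases hin : PySem.Str.isIn sep t = true
  · simp only [hin, if_true]
    rw [PySem.Str.splitMax?, PySem.Chars.splitMax?, hsep]
    have hne : ([c] : List Char).isEmpty = false := by simp
    simp only [hne, Bool.false_eq_true, if_false, Option.map_some, Option.getD_some]
    have hh := split_head c t.toList
    rcases hsplit : PySem.Chars.splitOnMax t.toList [c] 1 with _ | ⟨hd, tl⟩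
    · rw [hsplit] at hh; simp at hh
    · rw [hsplit] at hh
      simp only [List.head?_cons, Option.some_inj] at hh
      simp [PySem.List.pyGet?, PySem.List.pyIdx?, hh]
  · simp only [hin]
    have : ¬ (sep.toList <:+: t.toList) := by
      intro hinf
      exact hin (PySem.Str.isIn_iff_infix sep t |>.mpr hinf)
    rw [hsep] at this
    exact (tw_of_not_mem c t.toList (fun hm => this ((singleton_infix c t.toList).mpr hm))).symm

-- B's scan is the two sequential takeWhile passes of A
theorem altScan_eq (L : List Char) :
    altScan L = (L.takeWhile (· ≠ '?')).takeWhile (· ≠ '&') := by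
  induction L with
  | nil => simp [altScan]
  | cons c rest ih =>
    by_cases hq : c = '?'
    · simp [altScan, hq]
    · by_cases ha : c = '&'
      · simp [altScan, ha]
      · simp [altScan, hq, ha, ih]

theorem main_eq (value : Option String) :
    normalize_table_id_py value = normalize_table_id_py_alt value := by
  unfold normalize_table_id_py normalize_table_id_py_alt
  set text := PySem.Str.strip (value.getD "") with htext
  by_cases h0 : text = ""
  · rw [if_pos h0, h0]
    simp [altScan]
  · rw [if_neg h0]
    simp only [List.foldl]
    have hA2 := stepA_toList
      (if PySem.Str.isIn "?" text = true then (PySem.List.pyGet? ((PySem.Str.splitMax? text "?" 1).getD []) 0).getD "" else text)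
      '&' "&" rfl
    have hA1 := stepA_toList text '?' "?" rfl
    rw [hA1] at hA2
    apply String.toList_inj.mp
    rw [hA2, altScan_eq]
    simp

-- ===== VERDICT (by name: the statement is the Claim_ definition above) =====
theorem normalize_table_id_py_spec : Claim_equal_normalize_table_id_py := by
  intro value _
  unfold Spec_normalize_table_id_py
  exact main_eq value
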